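-- pv_equiv track=rewrite | github.com/sshivadas/Log_Analyser_DataPlay | Session_Utils.py | identify_sessions
-- ===== SOURCE A (Python) =====
-- def identify_sessions(user_activites):
--     all_user_sessions = {}
--     session_counter = 1
--     current_session = []
--     for activity in user_activites:
--         if activity.lower() in ['login', 'logout']:
--             if len(current_session) > 0:
--                 # End previous session at this login or logout
--                 all_user_sessions[session_counter] = current_session
--                 session_counter += 1
--             # start new session
--             current_session = []
--         else:
--             current_session.append(activity)
--     if len(current_session) > 0:
--         all_user_sessions[session_counter] = current_session
--     return all_user_sessions
-- ===== SOURCE B (Python) =====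
-- def identify_sessions(user_activites):
--     def is_boundary(a):
--         return a.lower() in ('login', 'logout')
--     sessions = []
--     i, n = 0, len(user_activites)
--     while i < n:
--         if is_boundary(user_activites[i]):
--             i += 1
--         else:
--             j = i
--             while j < n and not is_boundary(user_activites[j]):
--                 j += 1
--             sessions.append(user_activites[i:j])
--             i = j
--     return dict(enumerate(sessions, 1))
-- ===== Notes on version B (the rewrite author's own statement) =====
-- stated objective: alternative
-- what changed: Replaces A's accumulate-and-flush dict building (append each activity, flush the pending session into the dict at every boundary and at the end) by a partition-then-number scan: a two-pointer pass slices out each maximal run of non-boundary activities, and the sessions are numbered afterwards with enumerate(start=1).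
import Mathlib
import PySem

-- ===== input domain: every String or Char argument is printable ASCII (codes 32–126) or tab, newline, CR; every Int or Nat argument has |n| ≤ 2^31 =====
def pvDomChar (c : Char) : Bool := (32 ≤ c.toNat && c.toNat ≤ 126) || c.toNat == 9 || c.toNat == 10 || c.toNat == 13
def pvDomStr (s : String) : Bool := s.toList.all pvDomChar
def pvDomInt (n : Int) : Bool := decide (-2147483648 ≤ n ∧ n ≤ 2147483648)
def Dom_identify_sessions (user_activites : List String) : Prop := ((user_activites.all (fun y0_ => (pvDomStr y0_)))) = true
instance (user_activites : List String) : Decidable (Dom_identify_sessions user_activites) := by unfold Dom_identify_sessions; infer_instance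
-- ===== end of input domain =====

-- B replaces A's accumulate-and-flush dict building by a partition-then-number scan (alternative decomposition, same cost).

-- activity.lower() in ['login', 'logout']  (used by both Pythons)
def pvIsBoundary (a : String) : Bool := (["login", "logout"] : List String).contains (PySem.Str.lower a)

-- ===== PORT A =====
-- one loop iteration on the state (all_user_sessions, session_counter, current_session)
def pvStepA (st : PySem.Dict Int (List String) × Int × List String) (activity : String) :
    PySem.Dict Int (List String) × Int × List String :=
  let (d, c, cur) := st
  if pvIsBoundary activity then
    if cur.length > 0 then (d.insert c cur, c + 1, ([] : List String)) else (d, c, [])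
  else (d, c, cur ++ [activity])

-- the trailing "if len(current_session) > 0: …" and the dict returned as an assoc list
def pvFinishA (st : PySem.Dict Int (List String) × Int × List String) : List (Int × List String) :=
  if st.2.2.length > 0 then (st.1.insert st.2.1 st.2.2).items else st.1.items

def identify_sessions (user_activites : List String) : List (Int × List String) :=
  pvFinishA (user_activites.foldl pvStepA (PySem.Dict.empty, 1, []))

-- ===== PORT B =====
-- the outer while: skip a boundary, or slice out the maximal run user_activites[i:j] of non-boundaries
def pvSessions (l : List String) : List (List String) :=
  match l with
  | [] => []
  | x :: xs =>
    if pvIsBoundary x then pvSessions xs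
    else (x :: xs.takeWhile (fun a => !pvIsBoundary a)) ::
         pvSessions (xs.dropWhile (fun a => !pvIsBoundary a))
termination_by l.length
decreasing_by
  · simp
  · have := List.length_dropWhile_le (fun a => !pvIsBoundary a) xs
    simp; omega

-- dict(enumerate(sessions, 1))
def pvEnumFrom (c : Int) : List (List String) → List (Int × List String)
  | [] => []
  | g :: gs => (c, g) :: pvEnumFrom (c + 1) gs

def identify_sessions_alt (user_activites : List String) : List (Int × List String) :=
  pvEnumFrom 1 (pvSessions user_activites)

-- ===== PRECONDITION & SPEC =====
def Spec_identify_sessions (user_activites : List String) (out : List (Int × List String)) : Prop := out = identify_sessions_alt user_activites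
instance (user_activites : List String) (out : List (Int × List String)) : Decidable (Spec_identify_sessions user_activites out) := by unfold Spec_identify_sessions; infer_instance

-- ===== CLAIM (what is proved, stated in full; the proofs are below) =====
def Claim_equal_identify_sessions : Prop := ∀ (user_activites : List String), Dom_identify_sessions user_activites → Spec_identify_sessions user_activites (identify_sessions user_activites)

-- ===== LEMMAS AND PROOFS =====

-- A's loop seen as "the pending partial session cur, then the rest of the list"
def pvSess (cur : List String) : List String → List (List String)
  | [] => if cur.isEmpty then [] else [cur]
  | x :: xs =>
    if pvIsBoundary x then (if cur.isEmpty then pvSess [] xs else cur :: pvSess [] xs)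
    else pvSess (cur ++ [x]) xs

theorem pv_not_contains {d : PySem.Dict Int (List String)} {c : Int}
    (h : ∀ k ∈ d.keys, k < c) : d.contains c = false := by
  by_contra hc
  have : c ∈ d.keys := (PySem.Dict.contains_iff_mem_keys d c).1 (by
    cases hcc : d.contains c with
    | true => rfl
    | false => exact absurd hcc hc)
  exact absurd (h c this) (lt_irrefl c)

theorem pv_foldA : ∀ (l : List String) (d : PySem.Dict Int (List String)) (c : Int)
    (cur : List String), (∀ k ∈ d.keys, k < c) →
    pvFinishA (l.foldl pvStepA (d, c, cur)) = d.items ++ pvEnumFrom c (pvSess cur l) := by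
  intro l
  induction l with
  | nil =>
    intro d c cur h
    cases cur with
    | nil => simp [pvFinishA, pvSess, pvEnumFrom]
    | cons y ys =>
      simp [pvFinishA, pvSess, pvEnumFrom,
        PySem.Dict.items_insert_of_not_contains _ _ (pv_not_contains h)]
  | cons x xs ih =>
    intro d c cur h
    simp only [List.foldl_cons]
    by_cases hb : pvIsBoundary x = true
    · cases cur with
      | nil =>
        simp only [pvStepA, hb, if_true, List.length_nil, gt_iff_lt, lt_irrefl, if_false]
        rw [ih d c [] h]
        simp [pvSess, hb]
      | cons y ys =>
        simp only [pvStepA, hb, if_true, List.length_cons]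
        rw [if_pos (by omega)]
        rw [ih (d.insert c (y :: ys)) (c + 1) [] (by
          intro k hk
          rcases (PySem.Dict.mem_keys_insert d c k (y :: ys)).1 hk with h1 | h1
          · omega
          · have := h k h1; omega)]
        rw [PySem.Dict.items_insert_of_not_contains _ _ (pv_not_contains h)]
        simp [pvSess, hb, pvEnumFrom]
    · simp only [pvStepA, hb, if_false, Bool.false_eq_true]
      rw [ih d c (cur ++ [x]) h]
      simp [pvSess, hb]

theorem pv_sess_eq : ∀ (l cur : List String),
    pvSess cur l = if cur.isEmpty then pvSessions l
      else (cur ++ l.takeWhile (fun a => !pvIsBoundary a)) ::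
           pvSessions (l.dropWhile (fun a => !pvIsBoundary a)) := by
  intro l
  induction l with
  | nil =>
    intro cur
    cases cur <;> simp [pvSess, pvSessions]
  | cons x xs ih =>
    intro cur
    by_cases hb : pvIsBoundary x = true
    · have hs : pvSessions (x :: xs) = pvSessions xs := by rw [pvSessions]; simp [hb]
      cases cur with
      | nil => simp [pvSess, hb, ih, hs]
      | cons y ys =>
        simp only [pvSess, hb, if_true, List.isEmpty_cons, Bool.false_eq_true, if_false]
        rw [ih []]
        simp [hb, hs]
    · have hs : pvSessions (x :: xs) =
          (x :: xs.takeWhile (fun a => !pvIsBoundary a)) ::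
          pvSessions (xs.dropWhile (fun a => !pvIsBoundary a)) := by
        rw [pvSessions]; simp [hb]
      simp only [pvSess, hb, Bool.false_eq_true, if_false]
      rw [ih (cur ++ [x])]
      cases cur <;> simp [hb, hs]

-- ===== VERDICT (by name: the statement is the Claim_ definition above) =====
theorem identify_sessions_spec : Claim_equal_identify_sessions := by
  intro l _
  unfold Spec_identify_sessions identify_sessions identify_sessions_alt
  rw [pv_foldA l PySem.Dict.empty 1 [] (by simp [PySem.Dict.keys_empty])]
  rw [pv_sess_eq l []]
  simp [PySem.Dict.empty]
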